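-- pv_equiv track=rewrite | github.com/alxwen711/contestSubmissionArchive | codeforces/live contests/2025-1/1004/b.py | solve
-- ===== SOURCE A (Python) =====
-- def solve(n,ar):
--     best = n
--     for i in range(n):
--         if ar[i] == 0:
--             best -= 1
--     if best == n: return best
--     br = list()
--     fixedpts = list()
--     for a in range(n):
--         if ar[a] != 0: br.append(ar[a])
--         else: fixedpts.append(len(br))
--     fixedpts = list(set(fixedpts))
--     fixedpts.sort()
--     # if br is mexable, then return br's len (best+1)
--     mex = [0]*(n+3)
--     for c in br:
--         if c <= n: mex[c] += 1
--     mex[0] = 1000000 # assume infinite mex count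
--     index = 0
--     while mex[index] != 0:
--         index += 1
--     mi = 6986794693698439689693
--     fixindex = 0
--     for f in range(len(br)):
--         if f == fixedpts[fixindex]: # check for passage
--             if mi >= index: return best+1
--             fixindex += 1
--             if fixindex == len(fixedpts): return best
--         mi = min(f,mi)
--         if f <= n:
--             mex[f] -= 1
--             if mex[f] == 0 and f < index: index = f
--     return best+1
-- ===== SOURCE B (Python) =====
-- # Closed form: A's mex/index machinery never fires except at the first position,
-- # so the answer depends only on the zero count and the first/last of the first n elements.
-- def solve(n, ar):
--     if n <= 0:
--         return n
--     z = ar[:n].count(0)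
--     if z == 0:
--         return n
--     if ar[0] == 0 or ar[n-1] == 0:
--         return n - z + 1
--     return n - z
-- ===== Notes on version B (the rewrite author's own statement) =====
-- stated objective: simpler
-- what changed: Replaced the whole br/fixedpts/mex-count/index simulation by a closed form: since mex[0] stays huge, the passage test 'mi >= index' can only succeed at loop index 0, so the answer is determined by the zero count of ar[:n] and whether ar[0] or ar[n-1] is zero.
import Mathlib
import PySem

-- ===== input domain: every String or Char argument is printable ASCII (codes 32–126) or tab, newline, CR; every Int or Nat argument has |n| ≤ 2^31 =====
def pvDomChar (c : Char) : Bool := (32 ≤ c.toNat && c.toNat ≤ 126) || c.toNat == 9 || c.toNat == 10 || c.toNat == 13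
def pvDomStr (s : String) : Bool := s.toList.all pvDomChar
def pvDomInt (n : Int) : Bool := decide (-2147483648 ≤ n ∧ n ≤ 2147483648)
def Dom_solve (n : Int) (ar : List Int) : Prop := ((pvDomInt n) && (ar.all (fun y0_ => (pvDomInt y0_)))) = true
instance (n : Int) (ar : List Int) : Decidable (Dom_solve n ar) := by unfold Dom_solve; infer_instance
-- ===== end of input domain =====

-- B replaces A's br/fixedpts/mex simulation with a closed form over ar[:n]; equivalence of RETURN values on Pre_solve.

-- ===== PORT A =====
-- while mex[index] != 0: index += 1   (fuel = len(mex)+1 totalizes; Python would raise past the end, which cannot happen under Pre_solve)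
def solveWhile (mex : List Int) : Nat → Int → Int
  | 0, index => index
  | fuel + 1, index =>
    if PySem.List.pyGetD mex index 0 ≠ 0 then solveWhile mex fuel (index + 1) else index

-- the final 'for f in range(len(br))' loop of A, with its early returns
def solveLoop (n best : Int) (fp : List Int) : List Int → Int → Int → Int → List Int → Int
  | [], _, _, _, _ => best + 1
  | f :: rest, mi, fixindex, index, mex =>
    if f = PySem.List.pyGetD fp fixindex 0 then
      if mi ≥ index then best + 1
      else if fixindex + 1 = (fp.length : Int) then best
      else
        let mi' := min f mi
        if f ≤ n then
          let mex' := PySem.List.pySetD mex f (PySem.List.pyGetD mex f 0 - 1)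
          let index' := if PySem.List.pyGetD mex' f 0 = 0 ∧ f < index then f else index
          solveLoop n best fp rest mi' (fixindex + 1) index' mex'
        else solveLoop n best fp rest mi' (fixindex + 1) index mex
    else
      let mi' := min f mi
      if f ≤ n then
        let mex' := PySem.List.pySetD mex f (PySem.List.pyGetD mex f 0 - 1)
        let index' := if PySem.List.pyGetD mex' f 0 = 0 ∧ f < index then f else index
        solveLoop n best fp rest mi' fixindex index' mex'
      else solveLoop n best fp rest mi' fixindex index mex

def solve (n : Int) (ar : List Int) : Int :=
  let best := (PySem.List.pyRange 0 n 1).foldl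
    (fun best i => if PySem.List.pyGetD ar i 0 = 0 then best - 1 else best) n
  if best = n then best
  else
    let p := (PySem.List.pyRange 0 n 1).foldl
      (fun (p : List Int × List Int) a =>
        if PySem.List.pyGetD ar a 0 ≠ 0 then (p.1 ++ [PySem.List.pyGetD ar a 0], p.2)
        else (p.1, p.2 ++ [(p.1.length : Int)])) ([], [])
    let br := p.1
    let fixedpts := PySem.List.sorted (PySem.Set.ofList p.2) (fun x => x) false
    let mex0 := List.replicate (n + 3).toNat (0 : Int)
    let mex1 := br.foldl
      (fun mex c => if c ≤ n then PySem.List.pySetD mex c (PySem.List.pyGetD mex c 0 + 1) else mex) mex0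
    let mex2 := PySem.List.pySetD mex1 0 1000000
    let index := solveWhile mex2 (mex2.length + 1) 0
    solveLoop n best fixedpts (PySem.List.pyRange 0 (br.length : Int) 1)
      6986794693698439689693 0 index mex2

-- ===== PORT B =====
def solve_alt (n : Int) (ar : List Int) : Int :=
  if n ≤ 0 then n
  else
    let z : Int := (PySem.List.count (PySem.List.slice ar none (some n)) 0 : Nat)
    if z = 0 then n
    else if PySem.List.pyGetD ar 0 0 = 0 ∨ PySem.List.pyGetD ar (n - 1) 0 = 0 then n - z + 1
    else n - z

-- ===== PRECONDITION & SPEC =====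
-- Pre_solve excludes exactly the inputs where A raises IndexError: n beyond len(ar) (ar[i]),
-- and — when a zero occurs among the first n entries, so the mex table is built — an entry c
-- with c <= n below -(n+3) (mex[c] with a negative index past wraparound).
def Pre_solve (n : Int) (ar : List Int) : Prop :=
  (0 < n → n ≤ (ar.length : Int)) ∧
  ((0 : Int) ∈ ar.take n.toNat → ∀ c ∈ ar.take n.toNat, c ≤ n → -(n + 3) ≤ c)
instance (n : Int) (ar : List Int) : Decidable (Pre_solve n ar) := by unfold Pre_solve; infer_instance

def pvWitness_solve : Int × List Int := (4, [2, 0, 1, 2])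

def Spec_solve (n : Int) (ar : List Int) (out : Int) : Prop := out = solve_alt n ar
instance (n : Int) (ar : List Int) (out : Int) : Decidable (Spec_solve n ar out) := by unfold Spec_solve; infer_instance

-- ===== CLAIM (what is proved, stated in full; the proofs are below) =====
def Claim_equal_solve : Prop := ∀ (n : Int) (ar : List Int), Dom_solve n ar → Pre_solve n ar → Spec_solve n ar (solve n ar)

-- ===== LEMMAS AND PROOFS =====

-- fixOf t k = the fixedpts list A builds while scanning t, with k nonzeros already seen
def fixOf : List Int → Nat → List Int
  | [], _ => []
  | x :: xs, k => if x ≠ 0 then fixOf xs (k + 1) else (k : Int) :: fixOf xs k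

lemma bestFold (t : List Int) (a : Int) :
    t.foldl (fun b x => if x = 0 then b - 1 else b) a = a - (t.count 0 : Int) := by
  induction t generalizing a with
  | nil => simp
  | cons x xs ih =>
    by_cases h : x = 0 <;> simp [h, ih] <;> omega

lemma pairFold (t : List Int) (b fp : List Int) :
    t.foldl (fun (p : List Int × List Int) x =>
        if x ≠ 0 then (p.1 ++ [x], p.2) else (p.1, p.2 ++ [(p.1.length : Int)])) (b, fp)
      = (b ++ t.filter (fun x => x ≠ 0), fp ++ fixOf t b.length) := by
  induction t generalizing b fp with
  | nil => simp [fixOf]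
  | cons x xs ih =>
    simp only [List.foldl_cons]
    by_cases h : x = 0
    · rw [if_neg (by simp [h])]
      rw [ih]
      simp [fixOf, h]
    · rw [if_pos (by simp [h])]
      rw [ih]
      simp [fixOf, h, List.filter_cons]

lemma fixOf_ge (t : List Int) (k : Nat) : ∀ e ∈ fixOf t k, (k : Int) ≤ e := by
  induction t generalizing k with
  | nil => simp [fixOf]
  | cons x xs ih =>
    intro e he
    by_cases h : x = 0
    · rw [fixOf, if_neg (by simp [h])] at he
      rcases List.mem_cons.mp he with rfl | he'
      · omega
      · exact ih k e he'
    · rw [fixOf, if_pos (by simp [h])] at he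
      have := ih (k + 1) e he
      omega

lemma fixOf_eq_nil_iff (t : List Int) (k : Nat) : fixOf t k = [] ↔ (0 : Int) ∉ t := by
  induction t generalizing k with
  | nil => simp [fixOf]
  | cons x xs ih =>
    by_cases h : x = 0
    · rw [fixOf, if_neg (by simp [h])]
      simp [h]
    · rw [fixOf, if_pos (by simp [h])]
      rw [ih (k + 1)]
      simp [List.mem_cons, eq_comm, h]

lemma fixOf_zero_mem (t : List Int) : (0 : Int) ∈ fixOf t 0 ↔ ∃ xs, t = (0 : Int) :: xs := by
  cases t with
  | nil => simp [fixOf]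
  | cons x xs =>
    by_cases h : x = 0
    · subst h
      rw [fixOf, if_neg (by simp)]
      simp
    · rw [fixOf, if_pos (by simp [h])]
      constructor
      · intro hm
        exact absurd (fixOf_ge xs 1 0 hm) (by omega)
      · rintro ⟨ys, hy⟩
        cases hy
        simp at h

lemma fixOf_le (t : List Int) (k : Nat) :
    ∀ e ∈ fixOf t k, e ≤ (k : Int) + ((t.filter (fun x => x ≠ 0)).length : Int) := by
  induction t generalizing k with
  | nil => simp [fixOf]
  | cons x xs ih =>
    intro e he
    by_cases h : x = 0
    · rw [fixOf, if_neg (by simp [h])] at he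
      have hf : (x :: xs).filter (fun x => x ≠ 0) = xs.filter (fun x => x ≠ 0) := by
        simp [List.filter_cons, h]
      rw [hf]
      rcases List.mem_cons.mp he with rfl | he'
      · have : (0 : Int) ≤ ((xs.filter (fun x => x ≠ 0)).length : Int) := by positivity
        omega
      · exact ih k e he'
    · rw [fixOf, if_pos (by simp [h])] at he
      have hf : (x :: xs).filter (fun x => x ≠ 0) = x :: xs.filter (fun x => x ≠ 0) := by
        simp [List.filter_cons, h]
      rw [hf]
      have := ih (k + 1) e he
      simp only [List.length_cons]
      push_cast at this ⊢
      omega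

lemma fixOf_append_singleton (t : List Int) (x : Int) (k : Nat) :
    fixOf (t ++ [x]) k =
      fixOf t k ++ (if x = 0 then [(k : Int) + ((t.filter (fun y => y ≠ 0)).length : Int)] else []) := by
  induction t generalizing k with
  | nil =>
    by_cases h : x = 0 <;> simp [fixOf, h]
  | cons y ys ih =>
    by_cases hy : y = 0
    · rw [List.cons_append, fixOf, if_neg (by simp [hy]), fixOf, if_neg (by simp [hy]), ih]
      simp [List.filter_cons, hy]
    · rw [List.cons_append, fixOf, if_pos (by simp [hy]), fixOf, if_pos (by simp [hy]), ih]
      have hf : (y :: ys).filter (fun z => z ≠ 0) = y :: ys.filter (fun z => z ≠ 0) := by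
        simp [List.filter_cons, hy]
      rw [hf]
      simp only [List.length_cons]
      congr 1
      split <;> simp <;> push_cast <;> ring

-- (#nonzeros of t) ∈ fixOf t 0  ↔  t ends with a zero
lemma fixOf_last_mem (t : List Int) :
    (((t.filter (fun x => x ≠ 0)).length : Int)) ∈ fixOf t 0 ↔ t.getLast? = some 0 := by
  induction t using List.reverseRecOn with
  | nil => simp [fixOf]
  | append_singleton s x ih =>
    rw [fixOf_append_singleton]
    by_cases h : x = 0
    · simp [h, List.filter_append, List.filter_cons]
    · have hf : (s ++ [x]).filter (fun y => y ≠ 0) = s.filter (fun y => y ≠ 0) ++ [x] := by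
        simp [List.filter_append, List.filter_cons, h]
      rw [hf]
      simp only [h, if_false, List.append_nil, List.getLast?_concat]
      constructor
      · intro hm
        have := fixOf_le s 0 _ hm
        simp at this
      · intro hs
        exact absurd (Option.some.inj hs) h

lemma solveWhile_ge (mex : List Int) (fuel : Nat) (i : Int) : i ≤ solveWhile mex fuel i := by
  induction fuel generalizing i with
  | zero => simp [solveWhile]
  | succ fuel ih =>
    rw [solveWhile]
    split
    · have := ih (i + 1); omega
    · omega

lemma solveWhile_le (mex : List Int) (fuel : Nat) (i : Int) :
    solveWhile mex fuel i ≤ i + fuel := by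
  induction fuel generalizing i with
  | zero => simp [solveWhile]
  | succ fuel ih =>
    rw [solveWhile]
    split
    · have := ih (i + 1); omega
    · omega

lemma countFold_length (br : List Int) (n : Int) (mex : List Int) :
    (br.foldl (fun mex c => if c ≤ n then PySem.List.pySetD mex c (PySem.List.pyGetD mex c 0 + 1) else mex) mex).length
      = mex.length := by
  induction br generalizing mex with
  | nil => rfl
  | cons c cs ih =>
    simp only [List.foldl_cons]
    split
    · rw [ih, PySem.List.length_pySetD]
    · exact ih mex

-- in a strictly increasing list the last element is maximal
lemma pairwise_lt_last_max {l : List Int} (h : l.Pairwise (· < ·)) (i : Nat) (hi : i < l.length)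
    (hl : l.length - 1 < l.length) : l[i] ≤ l[l.length - 1] := by
  rcases Nat.lt_or_ge i (l.length - 1) with hlt | hge
  · exact le_of_lt ((List.pairwise_iff_getElem.mp h) i (l.length - 1) hi hl hlt)
  · have : i = l.length - 1 := by omega
    subst this
    exact le_refl _

-- main loop lemma for the iterations with f = s ≥ 1: mi ≤ 0 < index holds forever, so the loop
-- just walks through the remaining fixedpts entries
lemma loop_tail (n best : Int) (fp : List Int) (hpw : fp.Pairwise (· < ·)) :
    ∀ (len : Nat) (s L : Int), L ≤ s + (len : Int) →
    ∀ (d : Nat) (mi index : Int) (mex : List Int),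
      (hd : d < fp.length) →
      (∀ j, d ≤ j → (hj : j < fp.length) → s ≤ fp[j]) →
      1 ≤ s → mi ≤ 0 → 1 ≤ index →
      solveLoop n best fp (PySem.List.pyRange s L 1) mi (d : Int) index mex
        = if fp[fp.length - 1]'(by omega) < L then best else best + 1 := by
  intro len
  induction len with
  | zero =>
    intro s L hL d mi index mex hd hge hs hmi hidx
    rw [PySem.List.pyRange_one_eq_nil (by omega)]
    rw [solveLoop]
    have := hge (fp.length - 1) (by omega) (by omega)
    rw [if_neg (by omega)]
  | succ len ih =>
    intro s L hL d mi index mex hd hge hs hmi hidx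
    by_cases hsL : s < L
    · rw [PySem.List.pyRange_one_cons hsL]
      rw [solveLoop]
      have hget : PySem.List.pyGetD fp (d : Int) 0 = fp[d] := by
        rw [PySem.List.pyGetD_natCast]
        exact List.getD_eq_getElem fp 0 hd
      rw [hget]
      have hmono : ∀ j, d < j → (hj : j < fp.length) → fp[d] < fp[j] := fun j hdj hj =>
        (List.pairwise_iff_getElem.mp hpw) d j hd hj hdj
      by_cases hpass : s = fp[d]
      · rw [if_pos hpass, if_neg (by omega)]
        by_cases hdl : (d : Int) + 1 = (fp.length : Int)
        · rw [if_pos hdl]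
          have hdeq : fp.length - 1 = d := by omega
          have hdd : fp[fp.length - 1]'(by omega) = fp[d] := by simp [hdeq]
          rw [if_pos (by rw [hdd]; omega)]
        · rw [if_neg hdl]
          have hd1 : d + 1 < fp.length := by omega
          have hge' : ∀ j, d + 1 ≤ j → (hj : j < fp.length) → s + 1 ≤ fp[j] := by
            intro j hj1 hj
            have := hmono j (by omega) hj
            omega
          have hcast : (d : Int) + 1 = ((d + 1 : Nat) : Int) := by push_cast; ring
          split
      -- f ≤ n branch: recurse with updated mex/index
          · rw [hcast]
            rw [ih (s + 1) L (by omega) (d + 1) _ _ _ hd1 hge' (by omega) (by omega) (by split <;> omega)]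
          · rw [hcast]
            rw [ih (s + 1) L (by omega) (d + 1) _ _ _ hd1 hge' (by omega) (by omega) (by omega)]
      · rw [if_neg hpass]
        have hge' : ∀ j, d ≤ j → (hj : j < fp.length) → s + 1 ≤ fp[j] := by
          intro j hj1 hj
          rcases Nat.lt_or_ge d j with hdj | hdj
          · have := hmono j hdj hj
            have := hge d (le_refl d) hd
            omega
          · have hjd : j = d := by omega
            subst hjd
            have := hge j (le_refl j) hj
            omega
        split
        · rw [ih (s + 1) L (by omega) d _ _ _ hd hge' (by omega) (by omega) (by split <;> omega)]
        · rw [ih (s + 1) L (by omega) d _ _ _ hd hge' (by omega) (by omega) (by omega)]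
    · rw [PySem.List.pyRange_one_eq_nil (by omega)]
      rw [solveLoop]
      have := hge (fp.length - 1) (by omega) (by omega)
      rw [if_neg (by omega)]

lemma pyGetD_take (ar : List Int) (n j : Int) (h0 : 0 ≤ j) (hj : j < n)
    (hn : n ≤ (ar.length : Int)) :
    PySem.List.pyGetD ar j 0 = PySem.List.pyGetD (ar.take n.toNat) j 0 := by
  rw [PySem.List.pyGetD_of_nonneg _ _ h0, PySem.List.pyGetD_of_nonneg _ _ h0]
  have h1 : j.toNat < ar.length := by omega
  have h2 : j.toNat < (ar.take n.toNat).length := by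
    simp [List.length_take]
    omega
  rw [List.getD_eq_getElem _ _ h1, List.getD_eq_getElem _ _ h2]
  exact (List.getElem_take).symm

-- loop_tail specialised to fixindex = 0 and s = 1, with the cast normalised
lemma loop_tail0 (n best : Int) (fp : List Int) (hpw : fp.Pairwise (· < ·))
    (len : Nat) (L : Int) (hL : L ≤ 1 + (len : Int)) (mi index : Int) (mex : List Int)
    (hd : 0 < fp.length)
    (hge : ∀ j, (hj : j < fp.length) → (1 : Int) ≤ fp[j])
    (hs : (1 : Int) ≤ 1) (hmi : mi ≤ 0) (hidx : 1 ≤ index) :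
    solveLoop n best fp (PySem.List.pyRange 1 L) mi 0 index mex
      = if fp[fp.length - 1]'(by omega) < L then best else best + 1 := by
  have h := loop_tail n best fp hpw len 1 L hL 0 mi index mex hd
    (fun j _ hj => hge j hj) hs hmi hidx
  rw [show ((0 : Nat) : Int) = (0 : Int) from rfl] at h
  exact h

-- the whole final phase of A: since mex[0] stays ≥ 999999, index stays ≥ 1, so passages
-- return best+1 only at f = 0; the loop reduces to walking the fixedpts
lemma loop_main (n : Int) (t : List Int) (hn : 0 < n) (htlen : (t.length : Int) = n)
    (hz : t.count 0 ≠ 0) (index : Int) (hidx1 : 1 ≤ index)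
    (hidxB : index < 6986794693698439689693) (mex2 : List Int)
    (hm2len : 0 < mex2.length) (hm2 : PySem.List.pyGetD mex2 0 0 = 1000000) (best : Int) :
    solveLoop n best (PySem.List.sorted (PySem.Set.ofList (fixOf t 0)) (fun x => x))
      (PySem.List.pyRange 0 ((t.filter (fun x => x ≠ 0)).length : Int))
      6986794693698439689693 0 index mex2
    = if t.head? = some 0 ∨ t.getLast? = some 0 then best + 1 else best := by
  have h0t : (0 : Int) ∈ t := by
    have : 0 < t.count 0 := by omega
    exact List.count_pos_iff.mp this
  have htne : t ≠ [] := List.ne_nil_of_mem h0t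
  obtain ⟨t0, trest, ht0⟩ := List.exists_cons_of_ne_nil htne
  have hfrne : fixOf t 0 ≠ [] := by
    rw [Ne, fixOf_eq_nil_iff]
    simpa using h0t
  have hmemfp : ∀ x : Int, x ∈ PySem.List.sorted (PySem.Set.ofList (fixOf t 0)) (fun x => x)
      ↔ x ∈ fixOf t 0 := by
    intro x
    rw [PySem.List.mem_sorted, PySem.Set.mem_ofList]
  obtain ⟨e, he⟩ := List.exists_mem_of_ne_nil _ hfrne
  have hfpne : PySem.List.sorted (PySem.Set.ofList (fixOf t 0)) (fun x => x) ≠ [] :=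
    List.ne_nil_of_mem ((hmemfp e).mpr he)
  obtain ⟨m, tl, hfp⟩ := List.exists_cons_of_ne_nil hfpne
  have hpw := PySem.List.sorted_ofList_pairwise_lt (fixOf t 0)
  have hmin : ∀ y ∈ fixOf t 0, m ≤ y := by
    intro y hy
    exact PySem.List.key_head_sorted_le (PySem.Set.ofList (fixOf t 0)) (fun x => x) hfp y
      ((PySem.Set.mem_ofList _ _).mpr hy)
  have hge0 : ∀ x ∈ PySem.List.sorted (PySem.Set.ofList (fixOf t 0)) (fun x => x), (0 : Int) ≤ x := by
    intro x hx
    simpa using fixOf_ge t 0 x ((hmemfp x).mp hx)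
  have hleL : ∀ x ∈ PySem.List.sorted (PySem.Set.ofList (fixOf t 0)) (fun x => x),
      x ≤ ((t.filter (fun y => y ≠ 0)).length : Int) := by
    intro x hx
    simpa using fixOf_le t 0 x ((hmemfp x).mp hx)
  have hm_mem : m ∈ PySem.List.sorted (PySem.Set.ofList (fixOf t 0)) (fun x => x) := by
    rw [hfp]; exact List.mem_cons_self
  by_cases hL0 : (t.filter (fun x => x ≠ 0)).length = 0
  · -- br empty: loop body never runs, A returns best+1, and t is all zeros
    rw [show ((t.filter (fun x => x ≠ 0)).length : Int) = 0 from by exact_mod_cast hL0]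
    rw [PySem.List.pyRange_one_eq_nil (by omega), solveLoop]
    have hall : ∀ x ∈ t, x = 0 := by
      intro x hx
      by_contra hx0
      have : x ∈ t.filter (fun y => y ≠ 0) := List.mem_filter.mpr ⟨hx, by simpa using hx0⟩
      rw [List.length_eq_zero_iff] at hL0
      rw [hL0] at this
      simp at this
    have ht00 : t0 = 0 := hall t0 (by rw [ht0]; exact List.mem_cons_self)
    rw [if_pos (Or.inl (by rw [ht0, ht00]; rfl))]
  · have hget0 : PySem.List.pyGetD (PySem.List.sorted (PySem.Set.ofList (fixOf t 0)) (fun x => x))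
        (0 : Int) 0 = m := by
      rw [show (0 : Int) = ((0 : Nat) : Int) from rfl, PySem.List.pyGetD_natCast, hfp]
      rfl
    rw [PySem.List.pyRange_one_cons (by omega)]
    simp only [solveLoop]
    rw [hget0]
    by_cases hm0 : m = 0
    · rw [if_pos hm0.symm, if_pos (by omega)]
      have : ∃ xs, t = (0 : Int) :: xs := (fixOf_zero_mem t).mp ((hmemfp 0).mp (hm0 ▸ hm_mem))
      obtain ⟨xs, hxs⟩ := this
      rw [if_pos (Or.inl (by rw [hxs]; rfl))]
    · rw [if_neg (fun h => hm0 h.symm)]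
      rw [if_pos (show (0 : Int) ≤ n by omega)]
      have hm' : PySem.List.pyGetD (PySem.List.pySetD mex2 0 (PySem.List.pyGetD mex2 0 0 - 1)) 0 0
          = 999999 := by
        have h := PySem.List.pyGetD_pySetD_natCast mex2 0 0 (PySem.List.pyGetD mex2 0 0 - 1) 0 hm2len
        rw [show ((0 : Nat) : Int) = (0 : Int) from rfl] at h
        rw [h, hm2]
        norm_num
      rw [if_neg (by rw [hm']; norm_num)]
      have h0fp : (0 : Int) ∉ PySem.List.sorted (PySem.Set.ofList (fixOf t 0)) (fun x => x) := by
        intro h0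
        have h1 := hmin 0 ((hmemfp 0).mp h0)
        have h2 := hge0 m hm_mem
        omega
      have hge1 : ∀ j, 0 ≤ j → (hj : j < (PySem.List.sorted (PySem.Set.ofList (fixOf t 0)) (fun x => x)).length) →
          1 ≤ (PySem.List.sorted (PySem.Set.ofList (fixOf t 0)) (fun x => x))[j] := by
        intro j _ hj
        have hmem := List.getElem_mem hj
        have h1 := hge0 _ hmem
        by_contra hlt
        have : (PySem.List.sorted (PySem.Set.ofList (fixOf t 0)) (fun x => x))[j] = 0 := by omega
        exact h0fp (this ▸ hmem)
      have hfpl : 0 < (PySem.List.sorted (PySem.Set.ofList (fixOf t 0)) (fun x => x)).length := by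
        rw [hfp]; simp
      rw [show (0 : Int) + 1 = 1 from by norm_num]
      rw [loop_tail0 n best _ hpw ((t.filter (fun x => x ≠ 0)).length)
        ((t.filter (fun x => x ≠ 0)).length : Int) (by omega) _ _ _ hfpl
        (fun j hj => hge1 j (by omega) hj) (by norm_num) (min_le_left _ _) hidx1]
      -- now compare the last fixedpt with L
      have hlast_mem : (PySem.List.sorted (PySem.Set.ofList (fixOf t 0)) (fun x => x))[(PySem.List.sorted (PySem.Set.ofList (fixOf t 0)) (fun x => x)).length - 1]'(by omega) ∈
          PySem.List.sorted (PySem.Set.ofList (fixOf t 0)) (fun x => x) := List.getElem_mem _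
      have hiffL : (PySem.List.sorted (PySem.Set.ofList (fixOf t 0)) (fun x => x))[(PySem.List.sorted (PySem.Set.ofList (fixOf t 0)) (fun x => x)).length - 1]'(by omega)
          < ((t.filter (fun x => x ≠ 0)).length : Int)
          ↔ ¬ (((t.filter (fun x => x ≠ 0)).length : Int) ∈ fixOf t 0) := by
        constructor
        · intro hlt hmem
          obtain ⟨i, hi, hig⟩ := List.mem_iff_getElem.mp ((hmemfp _).mpr hmem)
          have := pairwise_lt_last_max hpw i hi (by omega)
          omega
        · intro hnm
          have h1 := hleL _ hlast_mem
          rcases lt_or_eq_of_le h1 with h | h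
          · exact h
          · exact absurd ((hmemfp _).mp (h ▸ hlast_mem)) hnm
      have hhead : t.head? ≠ some 0 := by
        rw [ht0]
        intro hh
        have ht00 : t0 = 0 := by simpa using hh
        have : (0 : Int) ∈ fixOf t 0 := (fixOf_zero_mem t).mpr ⟨trest, by rw [ht0, ht00]⟩
        have h1 := hmin 0 this
        have h2 := hge0 m hm_mem
        omega
      rw [fixOf_last_mem t] at hiffL
      by_cases hlast : t.getLast? = some 0
      · rw [if_neg (by rw [hiffL]; simpa using hlast), if_pos (Or.inr hlast)]
      · rw [if_pos (hiffL.mpr (by simpa using hlast)), if_neg (by simp [hlast, hhead])]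

lemma bestFold_range (ar : List Int) (n : Int) (hn : 0 < n) (hlen : n ≤ (ar.length : Int)) :
    (PySem.List.pyRange 0 n).foldl
      (fun best i => if PySem.List.pyGetD ar i 0 = 0 then best - 1 else best) n
      = n - (((ar.take n.toNat).count 0 : Nat) : Int) := by
  have htlen : ((ar.take n.toNat).length : Int) = n := by
    simp [List.length_take]; omega
  rw [PySem.List.foldl_congr_mem _ _
    (fun best i => if PySem.List.pyGetD (ar.take n.toNat) i 0 = 0 then best - 1 else best) _
    (by
      intro acc x hx
      rw [PySem.List.mem_pyRange_one] at hx
      rw [pyGetD_take ar n x hx.1 hx.2 hlen])]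
  conv_lhs => rw [show PySem.List.pyRange 0 n
    = PySem.List.pyRange 0 ((ar.take n.toNat).length : Int) from by rw [htlen]]
  rw [PySem.List.foldl_pyRange_zero_pyGetD' (ar.take n.toNat) 0
    (fun b x => if x = 0 then b - 1 else b)]
  rw [bestFold]

lemma pairFold_range (ar : List Int) (n : Int) (hn : 0 < n) (hlen : n ≤ (ar.length : Int)) :
    (PySem.List.pyRange 0 n).foldl
      (fun (p : List Int × List Int) a =>
        if PySem.List.pyGetD ar a 0 ≠ 0 then (p.1 ++ [PySem.List.pyGetD ar a 0], p.2)
        else (p.1, p.2 ++ [(p.1.length : Int)])) ([], [])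
      = ((ar.take n.toNat).filter (fun x => x ≠ 0), fixOf (ar.take n.toNat) 0) := by
  have htlen : ((ar.take n.toNat).length : Int) = n := by
    simp [List.length_take]; omega
  rw [PySem.List.foldl_congr_mem _ _
    (fun (p : List Int × List Int) a =>
      if PySem.List.pyGetD (ar.take n.toNat) a 0 ≠ 0
      then (p.1 ++ [PySem.List.pyGetD (ar.take n.toNat) a 0], p.2)
      else (p.1, p.2 ++ [(p.1.length : Int)])) _
    (by
      intro acc x hx
      rw [PySem.List.mem_pyRange_one] at hx
      rw [pyGetD_take ar n x hx.1 hx.2 hlen])]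
  conv_lhs => rw [show PySem.List.pyRange 0 n
    = PySem.List.pyRange 0 ((ar.take n.toNat).length : Int) from by rw [htlen]]
  rw [PySem.List.foldl_pyRange_zero_pyGetD' (ar.take n.toNat) 0
    (fun (p : List Int × List Int) x =>
      if x ≠ 0 then (p.1 ++ [x], p.2) else (p.1, p.2 ++ [(p.1.length : Int)]))]
  simpa using pairFold (ar.take n.toNat) [] []

-- ===== VERDICT (by name: the statement is the Claim_ definition above) =====
theorem solve_spec : Claim_equal_solve := by
  intro n ar hdom hpre
  unfold Spec_solve
  obtain ⟨hpre1, hpre2⟩ := hpre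
  unfold solve solve_alt
  by_cases hn : n ≤ 0
  · rw [PySem.List.pyRange_one_eq_nil (by omega)]
    simp [hn]
  · replace hn : 0 < n := by omega
    have hlen : n ≤ (ar.length : Int) := hpre1 hn
    have htlen : ((ar.take n.toNat).length : Int) = n := by
      simp [List.length_take]; omega
    rw [bestFold_range ar n hn hlen]
    rw [if_neg (show ¬ n ≤ 0 by omega)]
    have hslice : PySem.List.slice ar none (some n) = ar.take n.toNat :=
      PySem.List.slice_to ar (by omega)
    rw [hslice, PySem.List.count_eq]
    by_cases hz : (ar.take n.toNat).count 0 = 0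
    · rw [hz]
      norm_num
    · rw [if_neg (show ¬ n - (((ar.take n.toNat).count 0 : Nat) : Int) = n by omega),
          if_neg (show ¬ (((ar.take n.toNat).count 0 : Nat) : Int) = 0 by omega)]
      rw [pairFold_range ar n hn hlen]
      simp only []
      have h0t : (0 : Int) ∈ ar.take n.toNat := List.count_pos_iff.mp (by omega)
      set mex1 := List.foldl
        (fun mex c => if c ≤ n then PySem.List.pySetD mex c (PySem.List.pyGetD mex c 0 + 1) else mex)
        (List.replicate (n + 3).toNat (0 : Int)) ((ar.take n.toNat).filter (fun x => x ≠ 0)) with hmex1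
      set mex2 := PySem.List.pySetD mex1 0 1000000 with hmex2
      have hm1len : mex1.length = (n + 3).toNat := by
        rw [hmex1, countFold_length, List.length_replicate]
      have hm1pos : 0 < mex1.length := by omega
      have hm2len : mex2.length = (n + 3).toNat := by
        rw [hmex2, PySem.List.length_pySetD, hm1len]
      have hm2pos : 0 < mex2.length := by omega
      have hm2get : PySem.List.pyGetD mex2 0 0 = 1000000 := by
        have h := PySem.List.pyGetD_pySetD_natCast mex1 0 0 1000000 0 hm1pos
        rw [show ((0 : Nat) : Int) = (0 : Int) from rfl] at h
        rw [hmex2]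
        simpa using h
      set idx := solveWhile mex2 (mex2.length + 1) 0 with hidxdef
      have hidx1 : 1 ≤ idx := by
        rw [hidxdef, solveWhile, if_pos (by rw [hm2get]; norm_num)]
        exact solveWhile_ge mex2 mex2.length 1
      have hnB : n ≤ 2147483648 := by
        have hd : pvDomInt n = true := by
          have := hdom
          unfold Dom_solve at this
          simp at this
          exact this.1
        unfold pvDomInt at hd
        simpa using (of_decide_eq_true hd).2
      have hidxB : idx < 6986794693698439689693 := by
        have h1 := solveWhile_le mex2 (mex2.length + 1) 0
        rw [← hidxdef] at h1
        rw [hm2len] at h1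
        omega
      obtain ⟨t0, trest, ht0⟩ := List.exists_cons_of_ne_nil (List.ne_nil_of_mem h0t)
      have hB1 : (PySem.List.pyGetD ar 0 0 = 0) ↔ ((ar.take n.toNat).head? = some 0) := by
        rw [pyGetD_take ar n 0 (le_refl 0) hn hlen,
          PySem.List.pyGetD_of_nonneg _ _ (le_refl 0)]
        rw [ht0]
        simp
      have hB2 : (PySem.List.pyGetD ar (n - 1) 0 = 0) ↔ ((ar.take n.toNat).getLast? = some 0) := by
        rw [pyGetD_take ar n (n - 1) (by omega) (by omega) hlen,
          PySem.List.pyGetD_of_nonneg _ _ (by omega)]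
        have hlt : (n - 1).toNat < (ar.take n.toNat).length := by omega
        rw [List.getD_eq_getElem _ _ hlt, List.getLast?_eq_getElem?]
        have heq : (ar.take n.toNat).length - 1 = (n - 1).toNat := by omega
        rw [heq, List.getElem?_eq_getElem hlt]
        simp
      simp only [hB1, hB2]
      exact loop_main n (ar.take n.toNat) hn htlen hz idx hidx1 hidxB mex2 hm2pos hm2get
        (n - (((ar.take n.toNat).count 0 : Nat) : Int))
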